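-- pv_equiv track=rewrite | github.com/DmitryGubich/tasks | tasks/01_2024/07/suitable_locations.py | suitable_locations
-- ===== SOURCE A (Python) =====
-- def suitable_locations(center: list[int], d: int) -> int:
--     def binary_search(left, right, flag):
--         found = False
--         while left <= right:
--             middle = (left + right) // 2
--             answer = sum(abs(c - middle) * 2 for c in center)
--
--             if answer <= d:
--                 found = True
--                 if flag:
--                     right = middle - 1
--                 else:
--                     left = middle + 1
--             else:
--                 if flag:
--                     left = middle + 1
--                 else:
--                     right = middle - 1
--
--         return left if found else 0
--
--     left_corner = binary_search(left=min(center), right=max(center), flag=True)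
--     right_corner = binary_search(left=min(center), right=max(center), flag=False)
--
--     return right_corner - left_corner
-- ===== SOURCE B (Python) =====
-- def suitable_locations(center: list[int], d: int) -> int:
--     cs = sorted(center)
--     n = len(cs)
--     pref = [0] * (n + 1)
--     for i, c in enumerate(cs):
--         pref[i + 1] = pref[i] + c
--     total = pref[n]
--
--     def cost(m):
--         # k = number of elements <= m, found by bisection on the sorted list
--         lo, hi = 0, n
--         while lo < hi:
--             mid = (lo + hi) // 2
--             if cs[mid] <= m:
--                 lo = mid + 1
--             else:
--                 hi = mid
--         k = lo
--         return 2 * (m * k - pref[k] + (total - pref[k]) - m * (n - k))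
--
--     def search(left, right, flag):
--         found = False
--         while left <= right:
--             middle = (left + right) // 2
--             if cost(middle) <= d:
--                 found = True
--                 if flag:
--                     right = middle - 1
--                 else:
--                     left = middle + 1
--             else:
--                 if flag:
--                     left = middle + 1
--                 else:
--                     right = middle - 1
--         return left if found else 0
--
--     lo, hi = min(center), max(center)
--     return search(lo, hi, False) - search(lo, hi, True)
-- ===== Notes on version B (the rewrite author's own statement) =====
-- stated objective: faster
-- what changed: B sorts the centers once and builds prefix sums so each binary-search step evaluates the total distance via a bisection lookup in O(log n) instead of A's O(n) scan over all centers.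
import Mathlib
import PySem

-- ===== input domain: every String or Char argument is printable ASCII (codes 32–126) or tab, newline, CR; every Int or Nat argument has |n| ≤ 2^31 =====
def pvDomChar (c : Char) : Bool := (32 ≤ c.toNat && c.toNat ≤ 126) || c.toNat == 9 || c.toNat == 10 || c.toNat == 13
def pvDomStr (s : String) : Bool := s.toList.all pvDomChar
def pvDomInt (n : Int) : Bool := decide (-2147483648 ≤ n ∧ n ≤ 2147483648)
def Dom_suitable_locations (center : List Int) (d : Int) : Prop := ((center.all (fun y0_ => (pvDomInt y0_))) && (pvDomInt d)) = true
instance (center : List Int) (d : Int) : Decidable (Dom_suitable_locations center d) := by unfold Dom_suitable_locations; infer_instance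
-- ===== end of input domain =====

-- B keeps A's pair of binary searches over the location range but sorts the centers once and
-- evaluates the distance sum through prefix sums + bisection (O(log n) per step instead of A's
-- O(n) scan); measured faster on large center lists; return values identical on every nonempty list.
-- Loops are ported on an explicit fuel ≥ the iteration count (a totality guard only: the interval
-- shrinks every iteration, so the 'fuel ran out' branches coincide with the loops' exit branch).

-- ===== PORT A =====
-- answer = sum(abs(c - middle) * 2 for c in center)
def pvSumAbsA (center : List Int) (m : Int) : Int :=
  (center.map (fun c => |c - m| * 2)).sum

-- the 'while left <= right' loop of A's binary_search (returns 'left if found else 0')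
def pvBsearchA (center : List Int) (d : Int) (flag : Bool) : Nat → Int → Int → Bool → Int
  | 0, left, _, found => if found then left else 0
  | fuel + 1, left, right, found =>
    if left ≤ right then
      let middle := PySem.Int.floordiv (left + right) 2
      let answer := pvSumAbsA center middle
      if answer ≤ d then
        if flag then pvBsearchA center d flag fuel left (middle - 1) true
        else pvBsearchA center d flag fuel (middle + 1) right true
      else
        if flag then pvBsearchA center d flag fuel (middle + 1) right found
        else pvBsearchA center d flag fuel left (middle - 1) found
    else (if found then left else 0)

def suitable_locations (center : List Int) (d : Int) : Int :=
  match PySem.List.min? center (fun x => x), PySem.List.max? center (fun x => x) with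
  | some lo, some hi =>
      let left_corner := pvBsearchA center d true (hi + 1 - lo).toNat lo hi false
      let right_corner := pvBsearchA center d false (hi + 1 - lo).toNat lo hi false
      right_corner - left_corner
  | _, _ => 0   -- Python raises ValueError on an empty list; excluded by Pre_

-- ===== PORT B =====
-- the for-loop building pref: pref[i+1] = pref[i] + c  (pref = 0 :: pvBuildPref 0 cs)
def pvBuildPref (acc : Int) : List Int → List Int
  | [] => []
  | c :: rest => (acc + c) :: pvBuildPref (acc + c) rest

-- the hand-written bisection inside cost(): k = number of elements of sorted cs that are ≤ m
def pvBisect (cs : List Int) (m : Int) : Nat → Nat → Nat → Nat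
  | 0, lo, _ => lo
  | fuel + 1, lo, hi =>
    if lo < hi then
      let mid := (lo + hi) / 2      -- nonnegative ints: Python's // is Nat division here
      if cs.getD mid 0 ≤ m then pvBisect cs m fuel (mid + 1) hi   -- cs[mid]: mid < hi ≤ len, in range
      else pvBisect cs m fuel lo mid
    else lo

-- cost(m) = 2*(m*k - pref[k] + (total - pref[k]) - m*(n-k))
def pvCostB (cs pref : List Int) (m : Int) : Int :=
  let n := cs.length
  let k := pvBisect cs m n 0 n
  let total := pref.getD n 0
  2 * (m * (k : Int) - pref.getD k 0 + (total - pref.getD k 0) - m * ((n : Int) - (k : Int)))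

-- B's search loop: identical control flow, but the feasibility test calls cost()
def pvBsearchB (cs pref : List Int) (d : Int) (flag : Bool) : Nat → Int → Int → Bool → Int
  | 0, left, _, found => if found then left else 0
  | fuel + 1, left, right, found =>
    if left ≤ right then
      let middle := PySem.Int.floordiv (left + right) 2
      if pvCostB cs pref middle ≤ d then
        if flag then pvBsearchB cs pref d flag fuel left (middle - 1) true
        else pvBsearchB cs pref d flag fuel (middle + 1) right true
      else
        if flag then pvBsearchB cs pref d flag fuel (middle + 1) right found
        else pvBsearchB cs pref d flag fuel left (middle - 1) found
    else (if found then left else 0)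

def suitable_locations_alt (center : List Int) (d : Int) : Int :=
  let cs := PySem.List.sorted center (fun x => x) false
  let pref := 0 :: pvBuildPref 0 cs
  match PySem.List.min? center (fun x => x) with
  | none => 0   -- Python raises ValueError on an empty list; excluded by Pre_
  | some lo =>
      match PySem.List.max? center (fun x => x) with
      | none => 0
      | some hi =>
          pvBsearchB cs pref d false (hi + 1 - lo).toNat lo hi false -
            pvBsearchB cs pref d true (hi + 1 - lo).toNat lo hi false

-- ===== PRECONDITION & SPEC =====
-- A raises ValueError (min of an empty sequence) on center = []; both programs raise there.
def Pre_suitable_locations (center : List Int) (d : Int) : Prop := center ≠ []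
instance (center : List Int) (_d : Int) : Decidable (Pre_suitable_locations center _d) := by
  unfold Pre_suitable_locations; infer_instance
def pvWitness_suitable_locations : List Int × Int := ([1, 3, 2], 6)

def Spec_suitable_locations (center : List Int) (d : Int) (out : Int) : Prop := out = suitable_locations_alt center d
instance (center : List Int) (d : Int) (out : Int) : Decidable (Spec_suitable_locations center d out) := by unfold Spec_suitable_locations; infer_instance

-- ===== CLAIM (what is proved, stated in full; the proofs are below) =====
def Claim_equal_suitable_locations : Prop := ∀ (center : List Int) (d : Int), Dom_suitable_locations center d → Pre_suitable_locations center d → Spec_suitable_locations center d (suitable_locations center d)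

-- ===== LEMMAS AND PROOFS =====

theorem pvBuildPref_getD (cs : List Int) (acc : Int) (k : Nat) (hk : k < cs.length) :
    (pvBuildPref acc cs).getD k 0 = acc + ((cs.take (k + 1)).sum) := by
  induction cs generalizing acc k with
  | nil => simp at hk
  | cons c rest ih =>
      cases k with
      | zero => simp [pvBuildPref]
      | succ k =>
          simp only [pvBuildPref, List.getD_cons_succ, List.take_succ_cons, List.sum_cons]
          rw [ih (acc + c) k (by simpa using hk)]
          ring

theorem pvPref_getD (cs : List Int) (k : Nat) (hk : k ≤ cs.length) :
    (0 :: pvBuildPref 0 cs).getD k 0 = (cs.take k).sum := by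
  cases k with
  | zero => simp
  | succ k =>
      simp only [List.getD_cons_succ]
      rw [pvBuildPref_getD cs 0 k (by omega)]
      simp

-- loop invariant of the hand-written bisection (fuel ≥ interval width)
theorem pvBisect_inv (cs : List Int) (m : Int) :
    ∀ fuel lo hi, hi - lo ≤ fuel → lo ≤ hi → hi ≤ cs.length →
    (lo = 0 ∨ cs.getD (lo - 1) 0 ≤ m) → (hi = cs.length ∨ ¬ cs.getD hi 0 ≤ m) →
    lo ≤ pvBisect cs m fuel lo hi ∧ pvBisect cs m fuel lo hi ≤ hi ∧
      (pvBisect cs m fuel lo hi = 0 ∨ cs.getD (pvBisect cs m fuel lo hi - 1) 0 ≤ m) ∧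
      (pvBisect cs m fuel lo hi = cs.length ∨ ¬ cs.getD (pvBisect cs m fuel lo hi) 0 ≤ m) := by
  intro fuel
  induction fuel with
  | zero =>
      intro lo hi hn hlh hhn hlo hhi
      have : lo = hi := by omega
      subst this
      exact ⟨le_refl _, le_refl _, hlo, hhi⟩
  | succ fuel ih =>
      intro lo hi hn hlh hhn hlo hhi
      rw [pvBisect]
      by_cases h : lo < hi
      · simp only [if_pos h]
        by_cases hle : cs.getD ((lo + hi) / 2) 0 ≤ m
        · rw [if_pos hle]
          have := ih ((lo + hi) / 2 + 1) hi (by omega) (by omega) hhn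
            (Or.inr (by simpa using hle)) hhi
          omega
        · rw [if_neg hle]
          have := ih lo ((lo + hi) / 2) (by omega) (by omega) (by omega) hlo (Or.inr hle)
          omega
      · simp only [if_neg h]
        have : lo = hi := by omega
        subst this
        exact ⟨le_refl _, le_refl _, hlo, hhi⟩

-- on a monotone list, bisection over [0, n) separates the elements ≤ m from those > m
theorem pvBisect_sep (cs : List Int) (m : Int)
    (hmono : ∀ p q, p ≤ q → q < cs.length → cs.getD p 0 ≤ cs.getD q 0) :
    ∀ i, i < cs.length → (cs.getD i 0 ≤ m ↔ i < pvBisect cs m cs.length 0 cs.length) := by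
  obtain ⟨h1, h2, h3, h4⟩ := pvBisect_inv cs m cs.length 0 cs.length (by omega)
    (Nat.zero_le _) (le_refl _) (Or.inl rfl) (Or.inl rfl)
  intro i hi
  constructor
  · intro hle
    by_contra hge
    have hrl : pvBisect cs m cs.length 0 cs.length < cs.length := by omega
    have := hmono (pvBisect cs m cs.length 0 cs.length) i (by omega) hi
    rcases h4 with h4 | h4
    · omega
    · exact h4 (le_trans this hle)
  · intro hlt
    have hr1 : 1 ≤ pvBisect cs m cs.length 0 cs.length := by omega
    rcases h3 with h3 | h3
    · omega
    · exact le_trans (hmono i (pvBisect cs m cs.length 0 cs.length - 1) (by omega) (by omega)) h3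

theorem pvSumAbs_of_le (m : Int) (l : List Int) (h : ∀ c ∈ l, c ≤ m) :
    (l.map (fun c => |c - m| * 2)).sum = 2 * (m * l.length - l.sum) := by
  induction l with
  | nil => simp
  | cons c rest ih =>
      have hc := h c (List.mem_cons_self)
      have habs : |c - m| = m - c := by rw [abs_of_nonpos (by omega)]; ring
      simp only [List.map_cons, List.sum_cons, List.length_cons, habs,
        ih (fun x hx => h x (List.mem_cons_of_mem _ hx))]
      push_cast
      ring

theorem pvSumAbs_of_gt (m : Int) (l : List Int) (h : ∀ c ∈ l, m < c) :
    (l.map (fun c => |c - m| * 2)).sum = 2 * (l.sum - m * l.length) := by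
  induction l with
  | nil => simp
  | cons c rest ih =>
      have hc := h c (List.mem_cons_self)
      have habs : |c - m| = c - m := by rw [abs_of_nonneg (by omega)]
      simp only [List.map_cons, List.sum_cons, List.length_cons, habs,
        ih (fun x hx => h x (List.mem_cons_of_mem _ hx))]
      push_cast
      ring

-- cost() computes the same value as A's per-step scan, on a monotone cs with correct prefix sums
theorem pvCostB_eq (cs : List Int) (m : Int)
    (hmono : ∀ p q, p ≤ q → q < cs.length → cs.getD p 0 ≤ cs.getD q 0) :
    pvCostB cs (0 :: pvBuildPref 0 cs) m = pvSumAbsA cs m := by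
  have hsep := pvBisect_sep cs m hmono
  set k := pvBisect cs m cs.length 0 cs.length with hk
  have hkn : k ≤ cs.length :=
    (pvBisect_inv cs m cs.length 0 cs.length (by omega) (Nat.zero_le _) (le_refl _)
      (Or.inl rfl) (Or.inl rfl)).2.1
  have htake : ∀ c ∈ cs.take k, c ≤ m := by
    intro c hc
    obtain ⟨j, hj, rfl⟩ := List.mem_iff_getElem.mp hc
    have hjk : j < k := by rw [List.length_take] at hj; omega
    have hjl : j < cs.length := by omega
    have : (cs.take k)[j] = cs[j] := List.getElem_take
    rw [this]
    have := (hsep j hjl).mpr hjk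
    rwa [List.getD_eq_getElem _ _ hjl] at this
  have hdrop : ∀ c ∈ cs.drop k, m < c := by
    intro c hc
    obtain ⟨j, hj, rfl⟩ := List.mem_iff_getElem.mp hc
    have hjl : k + j < cs.length := by rw [List.length_drop] at hj; omega
    have : (cs.drop k)[j] = cs[k + j] := List.getElem_drop
    rw [this]
    have hnot : ¬ cs.getD (k + j) 0 ≤ m := fun hle => by
      have := (hsep (k + j) hjl).mp hle; omega
    rw [List.getD_eq_getElem _ _ hjl] at hnot
    omega
  have hsplit : pvSumAbsA cs m =
      ((cs.take k).map (fun c => |c - m| * 2)).sum + ((cs.drop k).map (fun c => |c - m| * 2)).sum := by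
    unfold pvSumAbsA
    rw [← List.sum_append, ← List.map_append, List.take_append_drop]
  have hlt : (cs.take k).length = k := by simpa using hkn
  have hld : (cs.drop k).length = cs.length - k := by simp
  have hds : (cs.drop k).sum = cs.sum - (cs.take k).sum := by
    have := List.take_append_drop k cs
    have hsum : (cs.take k).sum + (cs.drop k).sum = cs.sum := by
      rw [← List.sum_append, this]
    omega
  rw [hsplit, pvSumAbs_of_le m _ htake, pvSumAbs_of_gt m _ hdrop, hlt, hld, hds]
  simp only [pvCostB]
  rw [← hk, pvPref_getD cs k hkn, pvPref_getD cs cs.length (le_refl _), List.take_length]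
  push_cast [hkn]
  ring

-- the two search loops run in lockstep when the feasibility tests coincide
theorem pvBsearch_eq (center cs pref : List Int) (d : Int)
    (hcost : ∀ m, pvCostB cs pref m = pvSumAbsA center m) :
    ∀ fuel flag left right found,
      pvBsearchB cs pref d flag fuel left right found =
        pvBsearchA center d flag fuel left right found := by
  intro fuel
  induction fuel with
  | zero => intro flag left right found; rfl
  | succ fuel ih =>
      intro flag left right found
      rw [pvBsearchA, pvBsearchB]
      by_cases h : left ≤ right
      · simp only [if_pos h, hcost]
        by_cases hle : pvSumAbsA center (PySem.Int.floordiv (left + right) 2) ≤ d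
        · simp only [if_pos hle]
          cases flag <;> exact ih _ _ _ _
        · simp only [if_neg hle]
          cases flag <;> exact ih _ _ _ _
      · simp only [if_neg h]

-- monotonicity of the sorted list, in getD form
theorem pvSorted_mono (center : List Int) :
    ∀ p q, p ≤ q → q < (PySem.List.sorted center (fun x => x) false).length →
      (PySem.List.sorted center (fun x => x) false).getD p 0 ≤
      (PySem.List.sorted center (fun x => x) false).getD q 0 := by
  intro p q hpq hq
  have hp : p < (PySem.List.sorted center (fun x => x) false).length := by omega
  rw [List.getD_eq_getElem _ _ hp, List.getD_eq_getElem _ _ hq]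
  exact PySem.List.sorted_id_getElem_mono center hpq hq

theorem pvSumAbs_perm (center : List Int) (m : Int) :
    pvSumAbsA (PySem.List.sorted center (fun x => x) false) m = pvSumAbsA center m := by
  unfold pvSumAbsA
  exact List.Perm.sum_eq ((PySem.List.sorted_perm ..).map _)

-- ===== VERDICT (by name: the statement is the Claim_ definition above) =====
theorem suitable_locations_spec : Claim_equal_suitable_locations := by
  intro center d _ _
  unfold Spec_suitable_locations suitable_locations suitable_locations_alt
  have hcost : ∀ m, pvCostB (PySem.List.sorted center (fun x => x) false)
      (0 :: pvBuildPref 0 (PySem.List.sorted center (fun x => x) false)) m = pvSumAbsA center m := by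
    intro m
    rw [pvCostB_eq _ m (pvSorted_mono center), pvSumAbs_perm]
  cases hmin : PySem.List.min? center (fun x => x) <;>
    cases hmax : PySem.List.max? center (fun x => x) <;>
      simp only []
  case some.some lo hi =>
    rw [pvBsearch_eq center _ _ d hcost, pvBsearch_eq center _ _ d hcost]
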